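-- pv_equiv track=rewrite | github.com/akashvaghela09/python-practice-assignments | Phase D: Core Data Structures (No Loops)/9_dictionaries/test_14_findMostFrequentChar.py | _expected_most_frequent_non_space
-- ===== SOURCE A (Python) =====
-- def _expected_most_frequent_non_space(s: str):
--     counts = {}
--     for ch in s:
--         if ch == " ":
--             continue
--         counts[ch] = counts.get(ch, 0) + 1
--     if not counts:
--         return None
--     max_count = max(counts.values())
--     candidates = [ch for ch, c in counts.items() if c == max_count]
--     return sorted(candidates)[0]
-- ===== SOURCE B (Python) =====
-- def _expected_most_frequent_non_space(s: str):
--     chars = [ch for ch in s if ch != " "]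
--     if not chars:
--         return None
--     return min(set(chars), key=lambda ch: (-chars.count(ch), ch))
-- ===== Notes on version B (the rewrite author's own statement) =====
-- stated objective: simpler
-- what changed: Replaces the dict-counting / max-of-values / filter-candidates / sort pipeline with a single min over the distinct characters keyed by (-count, char), which encodes both the frequency maximisation and the alphabetical tie-break in one composite key.
import Mathlib
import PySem

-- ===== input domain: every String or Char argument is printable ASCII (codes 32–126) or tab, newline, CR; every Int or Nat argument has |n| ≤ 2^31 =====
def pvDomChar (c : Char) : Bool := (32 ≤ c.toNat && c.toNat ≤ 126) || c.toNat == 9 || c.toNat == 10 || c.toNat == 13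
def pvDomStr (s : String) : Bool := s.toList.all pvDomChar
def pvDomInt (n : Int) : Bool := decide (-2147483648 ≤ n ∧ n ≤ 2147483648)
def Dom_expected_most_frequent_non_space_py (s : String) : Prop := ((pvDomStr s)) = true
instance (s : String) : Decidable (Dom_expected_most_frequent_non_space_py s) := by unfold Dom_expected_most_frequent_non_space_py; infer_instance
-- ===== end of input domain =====

-- B replaces A's dict-count / max / filter-candidates / sort pipeline with one min over the
-- distinct characters keyed by (-count, char); objective: simpler.


-- ===== PORT A =====
def expected_most_frequent_non_space_py (s : String) : Option String :=
  let counts : PySem.Dict Char Int :=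
    s.toList.foldl (fun d ch => if ch == ' ' then d else d.insert ch (d.getD ch 0 + 1))
      PySem.Dict.empty
  if counts.size = 0 then none
  else
    match PySem.List.max? counts.values (fun v => v) with
    | none => none   -- unreachable totality guard: counts is nonempty here, so max(values) returns
    | some max_count =>
      let candidates : List Char :=
        counts.items.foldl (fun acc p => if p.2 == max_count then acc ++ [p.1] else acc) []
      (PySem.List.pyGet? (PySem.List.sorted candidates (fun x => x) false) 0).map
        (fun c => String.ofList [c])

-- ===== PORT B =====
def expected_most_frequent_non_space_py_alt (s : String) : Option String :=
  let chars : List Char := s.toList.filter (fun ch => ch != ' ')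
  if chars = [] then none
  else
    (PySem.List.min2? (PySem.Set.ofList chars)
        (fun ch => -((PySem.List.count chars ch : Int))) (fun ch => ch)).map
      (fun c => String.ofList [c])

-- ===== PRECONDITION & SPEC =====
def Spec_expected_most_frequent_non_space_py (s : String) (out : Option String) : Prop := out = expected_most_frequent_non_space_py_alt s
instance (s : String) (out : Option String) : Decidable (Spec_expected_most_frequent_non_space_py s out) := by unfold Spec_expected_most_frequent_non_space_py; infer_instance

-- ===== CLAIM (what is proved, stated in full; the proofs are below) =====
def Claim_equal_expected_most_frequent_non_space_py : Prop := ∀ (s : String), Dom_expected_most_frequent_non_space_py s → Spec_expected_most_frequent_non_space_py s (expected_most_frequent_non_space_py s)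

-- ===== LEMMAS AND PROOFS =====

def pvRel (k1 : Char → Int) (k2 : Char → Char) (a b : Char) : Prop :=
  k1 a < k1 b ∨ (k1 a = k1 b ∧ k2 a ≤ k2 b)

theorem pvRel_refl (k1 : Char → Int) (k2 : Char → Char) (a : Char) : pvRel k1 k2 a a :=
  Or.inr ⟨rfl, le_refl _⟩
theorem pvRel_trans {k1 : Char → Int} {k2 : Char → Char} {a b c : Char}
    (h1 : pvRel k1 k2 a b) (h2 : pvRel k1 k2 b c) : pvRel k1 k2 a c := by
  rcases h1 with h1 | ⟨h1, h1'⟩ <;> rcases h2 with h2 | ⟨h2, h2'⟩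
  · exact Or.inl (lt_trans h1 h2)
  · exact Or.inl (h2 ▸ h1)
  · exact Or.inl (h1 ▸ h2)
  · exact Or.inr ⟨h1.trans h2, le_trans h1' h2'⟩

theorem pvMin2_cons_cons (k1 : Char → Int) (k2 : Char → Char) (a x : Char) (rest : List Char) :
    PySem.List.min2? (a :: x :: rest) k1 k2 =
      PySem.List.min2? ((if (decide (k1 x < k1 a) || !decide (k1 a < k1 x) && decide (k2 x < k2 a)) = true
        then x else a) :: rest) k1 k2 := by
  by_cases hc : k1 x < k1 a ∨ (k1 x ≤ k1 a ∧ k2 x < k2 a) <;>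
    simp [PySem.List.min2?, hc]

theorem pvMin2_cons_spec (k1 : Char → Int) (k2 : Char → Char) :
    ∀ (xs : List Char) (a : Char), ∃ m,
      PySem.List.min2? (a :: xs) k1 k2 = some m ∧ (m = a ∨ m ∈ xs) ∧
      pvRel k1 k2 m a ∧ ∀ y ∈ xs, pvRel k1 k2 m y := by
  intro xs
  induction xs with
  | nil => intro a; exact ⟨a, rfl, Or.inl rfl, pvRel_refl k1 k2 a, by simp⟩
  | cons x rest ih =>
    intro a
    rw [pvMin2_cons_cons]
    by_cases hc : (decide (k1 x < k1 a) || !decide (k1 a < k1 x) && decide (k2 x < k2 a)) = true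
    · have hxa : pvRel k1 k2 x a := by
        simp only [Bool.or_eq_true, Bool.and_eq_true, Bool.not_eq_true', decide_eq_true_eq,
          decide_eq_false_iff_not] at hc
        rcases hc with h | ⟨h1, h2⟩
        · exact Or.inl h
        · rcases lt_or_eq_of_le (not_lt.mp h1) with hlt | heq
          · exact Or.inl hlt
          · exact Or.inr ⟨heq, le_of_lt h2⟩
      rw [if_pos hc]
      obtain ⟨m, hm, hmem, hrel, hall⟩ := ih x
      refine ⟨m, hm, ?_, pvRel_trans hrel hxa, ?_⟩
      · rcases hmem with rfl | hmem
        · exact Or.inr List.mem_cons_self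
        · exact Or.inr (List.mem_cons_of_mem _ hmem)
      · intro y hy
        rcases List.mem_cons.mp hy with rfl | hy
        · exact hrel
        · exact hall y hy
    · have hax : pvRel k1 k2 a x := by
        simp only [Bool.or_eq_true, Bool.and_eq_true, Bool.not_eq_true', decide_eq_true_eq,
          decide_eq_false_iff_not, not_or, not_and] at hc
        obtain ⟨h1, h2⟩ := hc
        rcases lt_or_eq_of_le (not_lt.mp h1) with hlt | heq
        · exact Or.inl hlt
        · exact Or.inr ⟨heq, not_lt.mp (h2 (by rw [heq]; exact lt_irrefl _))⟩
      rw [if_neg hc]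
      obtain ⟨m, hm, hmem, hrel, hall⟩ := ih a
      refine ⟨m, hm, ?_, hrel, ?_⟩
      · rcases hmem with rfl | hmem
        · exact Or.inl rfl
        · exact Or.inr (List.mem_cons_of_mem _ hmem)
      · intro y hy
        rcases List.mem_cons.mp hy with rfl | hy
        · exact pvRel_trans hrel hax
        · exact hall y hy

theorem pvMin2_spec {k1 : Char → Int} {k2 : Char → Char} {xs : List Char} (h : xs ≠ []) :
    ∃ m, PySem.List.min2? xs k1 k2 = some m ∧ m ∈ xs ∧ ∀ y ∈ xs, pvRel k1 k2 m y := by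
  obtain ⟨x, rest, rfl⟩ := List.exists_cons_of_ne_nil h
  obtain ⟨m, hm, hmem, hrel, hall⟩ := pvMin2_cons_spec k1 k2 rest x
  refine ⟨m, hm, ?_, ?_⟩
  · rcases hmem with rfl | hmem
    · exact List.mem_cons_self
    · exact List.mem_cons_of_mem _ hmem
  · intro y hy
    rcases List.mem_cons.mp hy with rfl | hy
    · exact hrel
    · exact hall y hy

theorem pvHead_sorted_spec {xs : List Char} {h : Char}
    (hh : PySem.List.pyGet? (PySem.List.sorted xs (fun x => x) false) 0 = some h) :
    h ∈ xs ∧ ∀ y ∈ xs, h ≤ y := by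
  rcases hs : PySem.List.sorted xs (fun x => x) false with _ | ⟨hd, tl⟩
  · rw [hs] at hh; simp [PySem.List.pyGet?, PySem.List.pyIdx?] at hh
  · rw [hs] at hh
    simp [PySem.List.pyGet?, PySem.List.pyIdx?] at hh
    subst hh
    have hp := PySem.List.sorted_pairwise xs (fun x => x)
    rw [hs] at hp
    have hhd : ∀ y ∈ tl, hd ≤ y := (List.pairwise_cons.mp hp).1
    constructor
    · have := PySem.List.mem_sorted xs (fun x => x) false hd
      rw [hs] at this; exact this.mp List.mem_cons_self
    · intro y hy
      have hy2 : y ∈ hd :: tl := by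
        have := PySem.List.mem_sorted xs (fun x => x) false y
        rw [hs] at this; exact this.mpr hy
      rcases List.mem_cons.mp hy2 with rfl | hy'
      · exact le_refl _
      · exact hhd y hy'

theorem pvGet_zero_none {xs : List Char} (h : PySem.List.pyGet? xs 0 = none) : xs = [] := by
  cases xs with
  | nil => rfl
  | cons x r => simp [PySem.List.pyGet?, PySem.List.pyIdx?] at h


theorem pv_core (t : List Char) :
    (if (PySem.Dict.counter t).size = 0 then none
     else
       match PySem.List.max? (PySem.Dict.counter t).values (fun v => v) with
       | none => none
       | some max_count =>
         (PySem.List.pyGet? (PySem.List.sorted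
             ((PySem.Dict.counter t).items.foldl
               (fun acc p => if p.2 == max_count then acc ++ [p.1] else acc) [])
             (fun x => x) false) 0).map (fun c => String.ofList [c]))
    = (if t = [] then none
       else (PySem.List.min2? (PySem.Set.ofList t)
           (fun ch => -((PySem.List.count t ch : Int))) (fun ch => ch)).map
         (fun c => String.ofList [c])) := by
  have hitems : (PySem.Dict.counter t).items
      = (PySem.Set.ofList t).map (fun k => (k, (List.count k t : Int))) :=
    PySem.Dict.items_counter t
  by_cases htnil : t = []
  · subst htnil
    simp [PySem.Dict.size, hitems]
  · have hD : PySem.Set.ofList t ≠ [] := by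
      obtain ⟨x, r, rfl⟩ := List.exists_cons_of_ne_nil htnil
      intro hx
      have := (PySem.Set.mem_ofList (x :: r) x).mpr List.mem_cons_self
      rw [hx] at this; exact absurd this (List.not_mem_nil)
    have hsize : (PySem.Dict.counter t).size ≠ 0 := by
      simp only [PySem.Dict.size, hitems, List.length_map]
      exact fun hlen => hD (List.eq_nil_of_length_eq_zero hlen)
    rw [if_neg hsize, if_neg htnil]
    have hvals : (PySem.Dict.counter t).values
        = (PySem.Set.ofList t).map (fun k => (List.count k t : Int)) := by
      simp only [PySem.Dict.values, hitems, List.map_map]; rfl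
    have hvne : (PySem.Dict.counter t).values ≠ [] := by
      rw [hvals]; simpa using hD
    rcases hM : PySem.List.max? (PySem.Dict.counter t).values (fun v => v) with _ | M
    · exact absurd ((PySem.List.max?_eq_none_iff _ _).mp hM) hvne
    · dsimp only
      have hmax : ∀ k ∈ PySem.Set.ofList t, (List.count k t : Int) ≤ M := by
        intro k hk
        have := PySem.List.max?_isMax hM ((List.count k t : Int))
          (by rw [hvals]; exact List.mem_map_of_mem hk)
        simpa using this
      have hMmem : ∃ k0 ∈ PySem.Set.ofList t, (List.count k0 t : Int) = M := by
        have := PySem.List.max?_mem hM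
        rw [hvals] at this
        obtain ⟨k0, hk0, he⟩ := List.mem_map.mp this
        exact ⟨k0, hk0, he⟩
      have hcand : (PySem.Dict.counter t).items.foldl
          (fun acc p => if p.2 == M then acc ++ [p.1] else acc) []
          = (PySem.Set.ofList t).filter (fun k => (List.count k t : Int) == M) := by
        simp only [PySem.List.foldl_append_if (fun (q : Char × Int) => q.2 == M) (fun q => q.1),
          hitems, List.filter_map, List.map_map, List.nil_append]
        simp [Function.comp_def]
      rw [hcand]
      set D := PySem.Set.ofList t with hDdef
      set cand := D.filter (fun k => (List.count k t : Int) == M) with hcd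
      have hcne : cand ≠ [] := by
        obtain ⟨k0, hk0, he⟩ := hMmem
        intro hnil
        have : k0 ∈ cand := by
          rw [hcd]; exact List.mem_filter.mpr ⟨hk0, by simpa using he⟩
        rw [hnil] at this; exact absurd this (List.not_mem_nil)
      rcases hg : PySem.List.pyGet? (PySem.List.sorted cand (fun x => x) false) 0 with _ | h
      · exact absurd ((PySem.List.sorted_eq_nil_iff _ _ _).mp (pvGet_zero_none hg)) hcne
      · obtain ⟨hhc, hhle⟩ := pvHead_sorted_spec hg
        obtain ⟨m, hm, hmD, hmrel⟩ :=
          pvMin2_spec (k1 := fun ch => -((PySem.List.count t ch : Int)))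
            (k2 := fun ch => ch) hD
        rw [hm]
        have hhD : h ∈ D := (List.mem_filter.mp hhc).1
        have hhM : (List.count h t : Int) = M := by
          have := (List.mem_filter.mp hhc).2; simpa using this
        have hmle : (List.count m t : Int) ≤ M := hmax m hmD
        have hrelh := hmrel h hhD
        simp only [pvRel, PySem.List.count_eq] at hrelh
        have hmM : (List.count m t : Int) = M := by
          rcases hrelh with hlt | ⟨heq, _⟩
          · exfalso; rw [hhM] at hlt; omega
          · rw [hhM] at heq; omega
        have hmcand : m ∈ cand := by
          rw [hcd]; exact List.mem_filter.mpr ⟨hmD, by simpa using hmM⟩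
        have hm_le_h : m ≤ h := by
          rcases hrelh with hlt | ⟨_, hle⟩
          · exfalso; rw [hhM] at hlt; omega
          · exact hle
        have : h = m := le_antisymm (hhle m hmcand) hm_le_h
        rw [this]

theorem pv_main (s : String) :
    expected_most_frequent_non_space_py s = expected_most_frequent_non_space_py_alt s := by
  unfold expected_most_frequent_non_space_py expected_most_frequent_non_space_py_alt
  have hfold : s.toList.foldl
      (fun d ch => if ch == ' ' then d else d.insert ch (d.getD ch 0 + 1)) PySem.Dict.empty
      = PySem.Dict.counter (s.toList.filter (fun ch => ch != ' ')) := by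
    rw [PySem.List.foldl_congr_mem s.toList _
      (fun d ch => if (ch != ' ') = true then d.insert ch (d.getD ch 0 + 1) else d) _
      (by intro acc x _; by_cases hx : x == ' ' <;> simp [bne, hx])]
    rw [PySem.List.foldl_if_eq_foldl_filter]
    exact PySem.Dict.foldl_insert_getD_add_one_eq_counter _
  rw [hfold]
  exact pv_core _

-- ===== VERDICT (by name: the statement is the Claim_ definition above) =====
theorem expected_most_frequent_non_space_py_spec : Claim_equal_expected_most_frequent_non_space_py := by
  intro s _
  unfold Spec_expected_most_frequent_non_space_py
  exact pv_main s
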